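-- pv_equiv track=rewrite | github.com/lsjmc0224/Algo-Study | 이상준/241014-241020/BOJ_2502.py | find_tteok_count
-- ===== SOURCE A (Python) =====
-- def find_tteok_count(D, K):
--     fib = [0] * (D + 1)
--     fib[1] = 1
--     fib[2] = 1
--
--     for i in range(3, D + 1):
--         fib[i] = fib[i - 1] + fib[i - 2]
--
--     for A in range(1, K // fib[D - 1] + 1):
--         if (K - A * fib[D - 2]) % fib[D - 1] == 0:
--             B = (K - A * fib[D - 2]) // fib[D - 1]
--             return A, B
-- ===== SOURCE B (Python) =====
-- def find_tteok_count(D, K):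
--     # x, y = fib(D-2), fib(D-1), keeping only the last two values
--     x, y = 0, 1
--     for _ in range(D - 2):
--         x, y = y, x + y
--     # Cassini: fib(n)^2 - fib(n-1)*fib(n+1) = (-1)^(n-1), so the modular inverse
--     # of x = fib(D-2) modulo y = fib(D-1) is x or -x depending on D's parity;
--     # the least positive solution of A*x == K (mod y) follows directly.
--     s = x if D % 2 == 1 else -x
--     A = (K * s) % y
--     if A == 0:
--         A = y
--     if A <= K // y:
--         return A, (K - A * x) // y
--     return None
-- ===== Notes on version B (the rewrite author's own statement) =====
-- stated objective: faster
-- what changed: Replaces A's trial loop over candidate day-1 counts (testing each A up to K//fib(D-1) for divisibility) with a direct closed-form solution of the linear congruence A*fib(D-2) == K (mod fib(D-1)), using Cassini's identity to get the modular inverse of fib(D-2), and keeps only the last two Fibonacci numbers instead of building the whole table.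
import Mathlib
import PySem

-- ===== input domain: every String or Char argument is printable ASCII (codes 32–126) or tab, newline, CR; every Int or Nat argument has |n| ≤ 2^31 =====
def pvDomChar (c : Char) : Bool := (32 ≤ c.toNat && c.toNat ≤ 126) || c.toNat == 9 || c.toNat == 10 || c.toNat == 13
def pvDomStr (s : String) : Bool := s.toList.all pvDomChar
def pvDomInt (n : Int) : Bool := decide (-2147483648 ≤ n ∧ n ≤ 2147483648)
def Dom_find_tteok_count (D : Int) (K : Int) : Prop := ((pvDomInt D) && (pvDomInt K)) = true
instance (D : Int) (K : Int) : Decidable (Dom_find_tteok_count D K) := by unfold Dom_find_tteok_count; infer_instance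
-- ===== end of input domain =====

-- B replaces A's linear search over candidate day-1 counts by solving the linear
-- congruence A·fib(D-2) ≡ K (mod fib(D-1)), with the modular inverse of fib(D-2)
-- read off Cassini's identity; objective: faster.

-- ===== PORT A =====
-- body of A's second for-loop (early return): first a in the list passing the test
def findTteokLoop (f2 f1 K : Int) : List Int → Option (List Int)
  | [] => none
  | a :: rest =>
    if PySem.Int.mod (K - a * f2) f1 = 0 then
      some [a, PySem.Int.floordiv (K - a * f2) f1]
    else findTteokLoop f2 f1 K rest

-- body of A's first for-loop: fib[i] = fib[i-1] + fib[i-2]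
def fibStep (f : List Int) (i : Int) : List Int :=
  PySem.List.pySetD f i (PySem.List.pyGetD f (i - 1) 0 + PySem.List.pyGetD f (i - 2) 0)

def find_tteok_count (D : Int) (K : Int) : Option (List Int) :=
  let fib0 : List Int := List.replicate (D + 1).toNat 0
  let fib1 := PySem.List.pySetD fib0 1 1
  let fib2 := PySem.List.pySetD fib1 2 1
  let fib := (PySem.List.pyRange 3 (D + 1) 1).foldl fibStep fib2
  findTteokLoop (PySem.List.pyGetD fib (D - 2) 0) (PySem.List.pyGetD fib (D - 1) 0) K
    (PySem.List.pyRange 1 (PySem.Int.floordiv K (PySem.List.pyGetD fib (D - 1) 0) + 1) 1)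

-- ===== PORT B =====
def find_tteok_count_alt (D : Int) (K : Int) : Option (List Int) :=
  let xy := (List.range (D - 2).toNat).foldl (fun (p : Int × Int) _ => (p.2, p.1 + p.2)) (0, 1)
  let s := if PySem.Int.mod D 2 = 1 then xy.1 else -xy.1
  let A0 := PySem.Int.mod (K * s) xy.2
  let A := if A0 = 0 then xy.2 else A0
  if A ≤ PySem.Int.floordiv K xy.2 then
    some [A, PySem.Int.floordiv (K - A * xy.1) xy.2]
  else none

-- ===== PRECONDITION & SPEC =====
-- Pre_ excludes exactly the inputs where A raises: for D < 2 the assignments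
-- fib[1] = 1 / fib[2] = 1 hit an index outside the list (IndexError).
def Pre_find_tteok_count (D : Int) (K : Int) : Prop := 2 ≤ D
instance (D : Int) (K : Int) : Decidable (Pre_find_tteok_count D K) := by
  unfold Pre_find_tteok_count; infer_instance

def pvWitness_find_tteok_count : Int × Int := (5, 10)

def Spec_find_tteok_count (D : Int) (K : Int) (out : Option (List Int)) : Prop :=
  out = find_tteok_count_alt D K
instance (D : Int) (K : Int) (out : Option (List Int)) : Decidable (Spec_find_tteok_count D K out) := by
  unfold Spec_find_tteok_count; infer_instance

-- ===== CLAIM (what is proved, stated in full; the proofs are below) =====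
def Claim_equal_find_tteok_count : Prop := ∀ (D : Int) (K : Int), Dom_find_tteok_count D K →
  Pre_find_tteok_count D K → Spec_find_tteok_count D K (find_tteok_count D K)

-- ===== LEMMAS AND PROOFS =====

-- B's pair fold computes consecutive Fibonacci numbers
theorem pairFold_fib (k : Nat) :
    (List.range k).foldl (fun (p : Int × Int) _ => (p.2, p.1 + p.2)) (0, 1)
      = ((Nat.fib k : Int), (Nat.fib (k + 1) : Int)) := by
  induction k with
  | zero => simp
  | succ n ih =>
    rw [List.range_succ, List.foldl_append, ih]
    simp [Nat.fib_add_two]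

-- Cassini's identity over the integers
theorem fib_cassini (n : Nat) :
    ((Nat.fib (n + 1) : Int)) ^ 2 - (Nat.fib n : Int) * (Nat.fib (n + 2) : Int) = (-1) ^ n := by
  induction n with
  | zero => norm_num
  | succ m ih =>
    have h2 : (Nat.fib (m + 2) : Int) = (Nat.fib m : Int) + (Nat.fib (m + 1) : Int) := by
      exact_mod_cast Nat.fib_add_two
    have h3 : (Nat.fib (m + 3) : Int) = (Nat.fib (m + 1) : Int) + (Nat.fib (m + 2) : Int) := by
      exact_mod_cast Nat.fib_add_two
    rw [h2] at ih
    rw [pow_succ, h3, h2]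
    linear_combination -ih

-- a Bézout certificate for B's parity-based modular inverse of fib N mod fib (N+1)
theorem cassini_bezout (d N : Nat) (hdN : d = N + 2) :
    ∃ t : Int, (if PySem.Int.mod (d : Int) 2 = 1 then (Nat.fib N : Int) else -(Nat.fib N : Int))
        * (Nat.fib N : Int) + t * (Nat.fib (N + 1) : Int) = 1 := by
  cases N with
  | zero =>
    exact ⟨1, by split_ifs <;> norm_num⟩
  | succ m =>
    have hc := fib_cassini m
    have hpar : PySem.Int.mod (d : Int) 2 = ((d % 2 : Nat) : Int) := by
      exact_mod_cast PySem.Int.mod_natCast d 2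
    rcases Nat.even_or_odd m with hm | hm
    · have h1 : PySem.Int.mod (d : Int) 2 = 1 := by
        obtain ⟨c, hc'⟩ := hm
        rw [hpar]
        have : d % 2 = 1 := by omega
        rw [this]; norm_num
      rw [if_pos h1]
      refine ⟨-(Nat.fib m : Int), ?_⟩
      have hpow : ((-1 : Int)) ^ m = 1 := hm.neg_one_pow
      rw [hpow] at hc
      linear_combination hc
    · have h1 : ¬ PySem.Int.mod (d : Int) 2 = 1 := by
        obtain ⟨c, hc'⟩ := hm
        rw [hpar]
        have : d % 2 = 0 := by omega
        rw [this]; norm_num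
      rw [if_neg h1]
      refine ⟨(Nat.fib m : Int), ?_⟩
      have hpow : ((-1 : Int)) ^ m = -1 := hm.neg_one_pow
      rw [hpow] at hc
      linear_combination -hc

-- A's fib-table fold: entries are Fibonacci numbers
theorem fibFold_spec (d : Nat) (hd : 2 ≤ d) (k : Nat) (hk : 3 + k ≤ d + 1) :
    (((PySem.List.pyRange 3 ((3 + k : Nat) : Int) 1).foldl fibStep
        (PySem.List.pySetD (PySem.List.pySetD (List.replicate (d + 1) (0 : Int)) 1 1) 2 1)).length
        = d + 1) ∧
    (∀ j : Nat, j < 3 + k →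
      ((PySem.List.pyRange 3 ((3 + k : Nat) : Int) 1).foldl fibStep
        (PySem.List.pySetD (PySem.List.pySetD (List.replicate (d + 1) (0 : Int)) 1 1) 2 1))[j]?
        = some ((Nat.fib j : Int))) := by
  induction k with
  | zero =>
    rw [show ((3 + 0 : Nat) : Int) = 3 by norm_num,
        PySem.List.pyRange_one_eq_nil (by norm_num)]
    rw [PySem.List.pySetD_of_nonneg _ _ (by norm_num), PySem.List.pySetD_of_nonneg _ _ (by norm_num)]
    refine ⟨by simp, ?_⟩
    intro j hj
    interval_cases j <;> simp [List.getElem?_set] <;> omega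
  | succ k ih =>
    have hk' : 3 + k ≤ d + 1 := by omega
    obtain ⟨ihl, ihe⟩ := ih hk'
    have hsplit : PySem.List.pyRange 3 ((3 + (k+1) : Nat) : Int) 1
        = PySem.List.pyRange 3 ((3 + k : Nat) : Int) 1 ++ [((3 + k : Nat) : Int)] := by
      rw [show ((3 + (k+1) : Nat) : Int) = ((3 + k : Nat) : Int) + 1 by push_cast; ring]
      exact PySem.List.pyRange_one_succ_right (by push_cast; omega)
    rw [hsplit, List.foldl_append]
    set L := (PySem.List.pyRange 3 ((3 + k : Nat) : Int) 1).foldl fibStep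
        (PySem.List.pySetD (PySem.List.pySetD (List.replicate (d + 1) (0 : Int)) 1 1) 2 1) with hL
    have hv1 : PySem.List.pyGetD L (((3 + k : Nat) : Int) - 1) 0 = (Nat.fib (2 + k) : Int) := by
      rw [show ((3 + k : Nat) : Int) - 1 = ((2 + k : Nat) : Int) by push_cast; ring,
          PySem.List.pyGetD_natCast, List.getD_eq_getElem?_getD, ihe (2 + k) (by omega)]
      rfl
    have hv2 : PySem.List.pyGetD L (((3 + k : Nat) : Int) - 2) 0 = (Nat.fib (1 + k) : Int) := by
      rw [show ((3 + k : Nat) : Int) - 2 = ((1 + k : Nat) : Int) by push_cast; ring,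
          PySem.List.pyGetD_natCast, List.getD_eq_getElem?_getD, ihe (1 + k) (by omega)]
      rfl
    have hfib : (Nat.fib (2 + k) : Int) + (Nat.fib (1 + k) : Int) = (Nat.fib (3 + k) : Int) := by
      rw [show 3 + k = (1 + k) + 2 by ring, Nat.fib_add_two, show (1 + k) + 1 = 2 + k by ring]
      push_cast; ring
    rw [List.foldl_cons, List.foldl_nil]
    unfold fibStep
    rw [hv1, hv2, hfib, PySem.List.pySetD_natCast]
    constructor
    · rw [List.length_set, ihl]
    · intro j hj
      rw [List.getElem?_set]
      by_cases hje : 3 + k = j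
      · subst hje
        rw [if_pos rfl, if_pos (by omega)]
      · rw [if_neg hje]
        exact ihe j (by omega)

-- the search loop returns none when no element passes
theorem findTteokLoop_none (f2 f1 K : Int) (l : List Int)
    (h : ∀ a ∈ l, PySem.Int.mod (K - a * f2) f1 ≠ 0) :
    findTteokLoop f2 f1 K l = none := by
  induction l with
  | nil => rfl
  | cons a rest ih =>
    rw [findTteokLoop, if_neg (h a (List.mem_cons_self))]
    exact ih (fun x hx => h x (List.mem_cons_of_mem a hx))

-- the search loop returns the first passing element
theorem findTteokLoop_first (f2 f1 K a : Int) (l1 l2 : List Int)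
    (h1 : ∀ x ∈ l1, PySem.Int.mod (K - x * f2) f1 ≠ 0)
    (ha : PySem.Int.mod (K - a * f2) f1 = 0) :
    findTteokLoop f2 f1 K (l1 ++ a :: l2)
      = some [a, PySem.Int.floordiv (K - a * f2) f1] := by
  induction l1 with
  | nil => rw [List.nil_append, findTteokLoop, if_pos ha]
  | cons x rest ih =>
    rw [List.cons_append, findTteokLoop, if_neg (h1 x (List.mem_cons_self))]
    exact ih (fun y hy => h1 y (List.mem_cons_of_mem x hy))

-- closed-form value of A's search loop, given a Bézout certificate for (f2, f1)
theorem loop_eq_closed (f2 f1 K s t : Int) (h1 : 0 < f1) (hbez : s * f2 + t * f1 = 1) :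
    findTteokLoop f2 f1 K (PySem.List.pyRange 1 (PySem.Int.floordiv K f1 + 1) 1)
      = (if (if PySem.Int.mod (K * s) f1 = 0 then f1 else PySem.Int.mod (K * s) f1)
            ≤ PySem.Int.floordiv K f1
         then some [(if PySem.Int.mod (K * s) f1 = 0 then f1 else PySem.Int.mod (K * s) f1),
            PySem.Int.floordiv
              (K - (if PySem.Int.mod (K * s) f1 = 0 then f1 else PySem.Int.mod (K * s) f1) * f2) f1]
         else none) := by
  set A0 := PySem.Int.mod (K * s) f1 with hA0
  set A : Int := if A0 = 0 then f1 else A0 with hA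
  have hA0nn : 0 ≤ A0 := PySem.Int.mod_nonneg (K * s) h1
  have hA0lt : A0 < f1 := PySem.Int.mod_lt (K * s) h1
  have hA1 : 1 ≤ A := by rw [hA]; split_ifs <;> omega
  have hAf1 : A ≤ f1 := by rw [hA]; split_ifs <;> omega
  have hAd : f1 ∣ A - A0 := by
    rw [hA]; split_ifs with h0
    · rw [h0, sub_zero]
    · simp
  have hq : A0 = K * s - f1 * (K * s / f1) := by
    rw [hA0, PySem.Int.mod_eq_emod_of_pos h1, Int.emod_def]
  have hdvd : f1 ∣ K - A * f2 := by
    obtain ⟨c, hc⟩ := hAd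
    refine ⟨K * t + (K * s / f1) * f2 - c * f2, ?_⟩
    have : A = A0 + f1 * c := by omega
    rw [this, hq]
    linear_combination (-K) * hbez
  have hcop : IsCoprime f1 f2 := ⟨t, s, by linarith⟩
  have huniq : ∀ x : Int, 1 ≤ x → x < A → ¬ (f1 ∣ K - x * f2) := by
    intro x hx1 hxA hdx
    have hd2 : f1 ∣ (A - x) * f2 := by
      have := dvd_sub hdx hdvd
      have e : K - x * f2 - (K - A * f2) = (A - x) * f2 := by ring
      rwa [e] at this
    have hd3 : f1 ∣ A - x := hcop.dvd_of_dvd_mul_right hd2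
    have := Int.le_of_dvd (by omega) hd3
    omega
  by_cases hle : A ≤ PySem.Int.floordiv K f1
  · rw [if_pos hle]
    have hsplit : PySem.List.pyRange 1 (PySem.Int.floordiv K f1 + 1) 1
        = PySem.List.pyRange 1 A 1 ++ (A :: PySem.List.pyRange (A + 1) (PySem.Int.floordiv K f1 + 1) 1) := by
      rw [← PySem.List.pyRange_one_cons (by omega),
          ← PySem.List.pyRange_one_append 1 A (PySem.Int.floordiv K f1 + 1) (by omega) (by omega)]
    rw [hsplit]
    apply findTteokLoop_first
    · intro x hx
      rw [PySem.List.mem_pyRange_one] at hx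
      rw [Ne, PySem.Int.mod_eq_zero_iff_dvd]
      exact huniq x hx.1 hx.2
    · rw [PySem.Int.mod_eq_zero_iff_dvd]
      exact hdvd
  · rw [if_neg hle]
    apply findTteokLoop_none
    intro x hx
    rw [PySem.List.mem_pyRange_one] at hx
    rw [Ne, PySem.Int.mod_eq_zero_iff_dvd]
    exact huniq x hx.1 (by omega)


-- ===== VERDICT (by name: the statement is the Claim_ definition above) =====
theorem find_tteok_count_spec : Claim_equal_find_tteok_count := by
  unfold Claim_equal_find_tteok_count
  intro D K _ hpre
  unfold Pre_find_tteok_count at hpre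
  unfold Spec_find_tteok_count
  obtain ⟨d, rfl⟩ : ∃ d : Nat, D = (d : Int) := ⟨D.toNat, (Int.toNat_of_nonneg (by omega)).symm⟩
  have hd : 2 ≤ d := by exact_mod_cast hpre
  set N := d - 2 with hN
  -- A's Fibonacci table
  have hrange : ((d : Int) + 1) = ((3 + N : Nat) : Int) := by push_cast; omega
  have htn : (((d : Int)) + 1).toNat = d + 1 := by omega
  obtain ⟨hlen, hent⟩ := fibFold_spec d hd N (by omega)
  rw [find_tteok_count]
  rw [htn, hrange]
  set fib := (PySem.List.pyRange 3 ((3 + N : Nat) : Int) 1).foldl fibStep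
      (PySem.List.pySetD (PySem.List.pySetD (List.replicate (d + 1) (0 : Int)) 1 1) 2 1) with hfib
  have hget1 : PySem.List.pyGetD fib ((d : Int) - 1) 0 = (Nat.fib (N + 1) : Int) := by
    rw [show (d : Int) - 1 = ((N + 1 : Nat) : Int) by push_cast; omega,
        PySem.List.pyGetD_natCast, List.getD_eq_getElem?_getD, hent (N + 1) (by omega)]
    rfl
  have hget2 : PySem.List.pyGetD fib ((d : Int) - 2) 0 = (Nat.fib N : Int) := by
    rw [show (d : Int) - 2 = ((N : Nat) : Int) by omega,
        PySem.List.pyGetD_natCast, List.getD_eq_getElem?_getD, hent N (by omega)]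
    rfl
  rw [hget1, hget2]
  -- B's side
  rw [find_tteok_count_alt]
  rw [show ((d : Int) - 2).toNat = N by omega, pairFold_fib]
  -- Bézout certificate from Cassini
  obtain ⟨t, ht⟩ := cassini_bezout d N (by omega)
  have h1 : (0 : Int) < (Nat.fib (N + 1) : Int) := by
    exact_mod_cast Nat.fib_pos.mpr (Nat.succ_pos N)
  exact loop_eq_closed _ _ K _ _ h1 ht
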